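-- pv_equiv track=rewrite | github.com/Andaluzov/game_x_or_o | gametools.py | param_of_cell
-- ===== SOURCE A (Python) =====
-- def param_of_cell(pole):
--     pole_coord = []
--     pole_number = [['1', '2', '3'], ['4', '5', '6'], ['7', '8', '9']]
--     for i in [0,1,2]:
--         for j in [0,1,2]:
--             if pole == pole_number[i][j]:
--                 pole_coord.append(i)
--                 pole_coord.append(j)
--
--     return(pole_coord)
-- ===== SOURCE B (Python) =====
-- def param_of_cell(pole):
--     if isinstance(pole, str) and len(pole) == 1 and pole in '123456789':
--         idx = ord(pole) - ord('1')
--         return [idx // 3, idx % 3]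
--     return []
-- ===== Notes on version B (the rewrite author's own statement) =====
-- stated objective: simpler
-- what changed: Replaces the nested 3x3 table scan with a guard that the input is a single decimal digit cell label followed by a closed-form coordinate computation idx//3, idx%3.
import Mathlib
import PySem

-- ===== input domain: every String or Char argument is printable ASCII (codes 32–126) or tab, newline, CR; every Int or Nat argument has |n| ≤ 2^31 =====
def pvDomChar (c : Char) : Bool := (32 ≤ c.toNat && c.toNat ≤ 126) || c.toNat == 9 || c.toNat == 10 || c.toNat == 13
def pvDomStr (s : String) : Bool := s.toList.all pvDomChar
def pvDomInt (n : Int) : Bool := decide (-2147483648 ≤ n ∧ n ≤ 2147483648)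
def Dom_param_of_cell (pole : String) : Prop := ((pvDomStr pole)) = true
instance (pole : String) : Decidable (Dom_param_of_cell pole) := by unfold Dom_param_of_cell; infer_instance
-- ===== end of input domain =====

-- B replaces A's nested 3x3 table scan by a single-digit-cell-label guard plus closed-form coordinates idx//3, idx%3 (objective: simpler).

-- ===== PORT A =====
def param_of_cell (pole : String) : List Int :=
  let pole_number : List (List String) := [["1", "2", "3"], ["4", "5", "6"], ["7", "8", "9"]]
  ([0, 1, 2] : List Int).foldl (fun acc i =>
    ([0, 1, 2] : List Int).foldl (fun acc j =>
      if pole == PySem.List.pyGetD (PySem.List.pyGetD pole_number i []) j "" then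
        (acc ++ [i]) ++ [j]
      else acc) acc) []

-- ===== PORT B =====
def param_of_cell_alt (pole : String) : List Int :=
  if PySem.Str.len pole = 1 ∧ PySem.Str.isIn pole "123456789" then
    let idx : Int := (pole.toList.headD ' ').toNat - 49  -- ord(pole) - ord('1')
    [PySem.Int.floordiv idx 3, PySem.Int.mod idx 3]
  else []

-- ===== PRECONDITION & SPEC =====
def Spec_param_of_cell (pole : String) (out : List Int) : Prop := out = param_of_cell_alt pole
instance (pole : String) (out : List Int) : Decidable (Spec_param_of_cell pole out) := by unfold Spec_param_of_cell; infer_instance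

-- ===== CLAIM (what is proved, stated in full; the proofs are below) =====
def Claim_equal_param_of_cell : Prop := ∀ (pole : String), Dom_param_of_cell pole → Spec_param_of_cell pole (param_of_cell pole)

-- ===== LEMMAS AND PROOFS =====

-- If pole is one of the nine digit strings, both sides are a closed computation.
theorem pole_eq_of_toList {pole t : String} (h : pole.toList = t.toList) : pole = t :=
  String.toList_inj.mp h

theorem param_of_cell_main (pole : String) : param_of_cell pole = param_of_cell_alt pole := by
  by_cases h : pole.toList ∈ ([['1'],['2'],['3'],['4'],['5'],['6'],['7'],['8'],['9']] : List (List Char))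
  · simp only [List.mem_cons, List.not_mem_nil, or_false] at h
    rcases h with h|h|h|h|h|h|h|h|h
    · rw [pole_eq_of_toList (pole := pole) (t := "1") (by rw [h]; decide)]; decide
    · rw [pole_eq_of_toList (pole := pole) (t := "2") (by rw [h]; decide)]; decide
    · rw [pole_eq_of_toList (pole := pole) (t := "3") (by rw [h]; decide)]; decide
    · rw [pole_eq_of_toList (pole := pole) (t := "4") (by rw [h]; decide)]; decide
    · rw [pole_eq_of_toList (pole := pole) (t := "5") (by rw [h]; decide)]; decide
    · rw [pole_eq_of_toList (pole := pole) (t := "6") (by rw [h]; decide)]; decide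
    · rw [pole_eq_of_toList (pole := pole) (t := "7") (by rw [h]; decide)]; decide
    · rw [pole_eq_of_toList (pole := pole) (t := "8") (by rw [h]; decide)]; decide
    · rw [pole_eq_of_toList (pole := pole) (t := "9") (by rw [h]; decide)]; decide
  · simp only [List.mem_cons, List.not_mem_nil, or_false, not_or] at h
    obtain ⟨h1, h2, h3, h4, h5, h6, h7, h8, h9⟩ := h
    have hne : ∀ t : String, pole.toList ≠ t.toList → ¬ (pole = t) := by
      intro t ht e
      exact ht (by rw [e])
    have n1 : ¬ (pole = "1") := hne _ (by intro e; exact h1 (by rw [e]; decide))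
    have n2 : ¬ (pole = "2") := hne _ (by intro e; exact h2 (by rw [e]; decide))
    have n3 : ¬ (pole = "3") := hne _ (by intro e; exact h3 (by rw [e]; decide))
    have n4 : ¬ (pole = "4") := hne _ (by intro e; exact h4 (by rw [e]; decide))
    have n5 : ¬ (pole = "5") := hne _ (by intro e; exact h5 (by rw [e]; decide))
    have n6 : ¬ (pole = "6") := hne _ (by intro e; exact h6 (by rw [e]; decide))
    have n7 : ¬ (pole = "7") := hne _ (by intro e; exact h7 (by rw [e]; decide))
    have n8 : ¬ (pole = "8") := hne _ (by intro e; exact h8 (by rw [e]; decide))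
    have n9 : ¬ (pole = "9") := hne _ (by intro e; exact h9 (by rw [e]; decide))
    have hB : param_of_cell_alt pole = [] := by
      rw [param_of_cell_alt, if_neg]
      rintro ⟨hlen, hin⟩
      have hl : pole.toList.length = 1 := by
        have := PySem.Str.len_eq pole
        omega
      obtain ⟨c, hc⟩ : ∃ c, pole.toList = [c] := by
        match hme : pole.toList, hl with
        | [c], _ => exact ⟨c, rfl⟩
      have hsub : pole.toList <:+: "123456789".toList := (PySem.Str.isIn_iff_infix pole "123456789").mp hin
      have hmem : c ∈ ("123456789".toList) := by
        apply hsub.subset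
        rw [hc]; exact List.mem_singleton_self c
      have hdig : c ∈ ['1','2','3','4','5','6','7','8','9'] := by
        have e : "123456789".toList = ['1','2','3','4','5','6','7','8','9'] := by decide
        rwa [e] at hmem
      fin_cases hdig
      · exact h1 hc
      · exact h2 hc
      · exact h3 hc
      · exact h4 hc
      · exact h5 hc
      · exact h6 hc
      · exact h7 hc
      · exact h8 hc
      · exact h9 hc
    rw [hB]
    simp [param_of_cell, List.foldl, PySem.List.pyGetD, n1, n2, n3, n4, n5, n6, n7, n8, n9]

-- ===== VERDICT (by name: the statement is the Claim_ definition above) =====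
theorem param_of_cell_spec : Claim_equal_param_of_cell := by
  intro pole _
  exact param_of_cell_main pole
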